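-- pv_equiv track=rewrite | github.com/raduangelescu/drugrecommender | genedrugrecommender/drugrecommender.py | _get_best_drug_and_remove
-- ===== SOURCE A (Python) =====
-- def _get_best_drug_and_remove(all_drugs, gene_drugs):
--     drug_scores = {}
--     for drug in all_drugs:
--         if drug not in drug_scores:
--             drug_scores[drug] = 0
--         for gene_set in gene_drugs:
--             if drug in gene_set:
--                 drug_scores[drug] += 1
--     mx = -1
--     drug = ''
--     for drug_name, score in drug_scores.items():
--         if mx < score:
--             mx = score
--             drug = drug_name
--     for gene_set in gene_drugs:
--         if drug in gene_set:
--             gene_set.remove(drug)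
--     return drug, mx
-- ===== SOURCE B (Python) =====
-- def _get_best_drug_and_remove(all_drugs, gene_drugs):
--     hits = {}
--     for gene_set in gene_drugs:
--         for g in set(gene_set):
--             hits[g] = hits.get(g, 0) + 1
--     occ = {}
--     for d in all_drugs:
--         occ[d] = occ.get(d, 0) + 1
--     best, mx = '', -1
--     for d, c in occ.items():
--         score = c * hits.get(d, 0)
--         if score > mx:
--             best, mx = d, score
--     for gene_set in gene_drugs:
--         if best in gene_set:
--             gene_set.remove(best)
--     return best, mx
-- ===== Notes on version B (the rewrite author's own statement) =====
-- stated objective: faster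
-- what changed: Instead of re-scanning every gene set for every drug (O(D*G*|set|)), B builds one hit-counter over the gene sets and one occurrence counter over all_drugs in single passes, then picks the first strict maximum of occurrences*hits in first-occurrence order.
import Mathlib
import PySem

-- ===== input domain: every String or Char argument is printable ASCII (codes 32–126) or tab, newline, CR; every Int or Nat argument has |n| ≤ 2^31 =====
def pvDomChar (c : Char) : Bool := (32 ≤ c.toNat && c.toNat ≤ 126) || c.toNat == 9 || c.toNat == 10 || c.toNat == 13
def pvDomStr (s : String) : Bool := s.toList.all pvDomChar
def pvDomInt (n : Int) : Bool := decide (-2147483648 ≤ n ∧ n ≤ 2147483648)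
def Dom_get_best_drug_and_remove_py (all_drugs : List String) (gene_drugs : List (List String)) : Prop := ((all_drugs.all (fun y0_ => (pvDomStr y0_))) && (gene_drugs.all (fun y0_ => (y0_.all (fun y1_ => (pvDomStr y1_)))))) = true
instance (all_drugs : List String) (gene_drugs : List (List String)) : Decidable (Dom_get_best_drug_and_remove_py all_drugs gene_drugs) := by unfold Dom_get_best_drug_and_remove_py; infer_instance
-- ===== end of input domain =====

-- B replaces A's drug-by-drug rescan of every gene set with two single-pass counters
-- (gene-set hits and drug occurrences); equivalence is about the RETURN value only —
-- both Pythons also remove the chosen drug from each gene set in place, identically.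


-- ===== PORT A =====
-- literal transliteration of A; the final 'gene_set.remove(drug)' loop in A only
-- mutates the argument and never affects the returned pair, so it has no counterpart
-- in this return-value port.
def get_best_drug_and_remove_py (all_drugs : List String) (gene_drugs : List (List String)) : String × Int :=
  let drug_scores : PySem.Dict String Int :=
    all_drugs.foldl
      (fun d drug =>
        let d := if d.contains drug then d else d.insert drug 0
        gene_drugs.foldl (fun d gene_set => if gene_set.contains drug then d.modify drug 0 (· + 1) else d) d)
      PySem.Dict.empty
  let r := drug_scores.items.foldl (fun s p => if s.2 < p.2 then (p.1, p.2) else s) ("", -1)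
  r

-- ===== PORT B =====
-- transliteration of Source B: hit counter over the (deduplicated) gene sets, occurrence
-- counter over all_drugs, then one scan of occ.items keeping the first strict maximum.
def get_best_drug_and_remove_py_alt (all_drugs : List String) (gene_drugs : List (List String)) : String × Int :=
  let hits : PySem.Dict String Int :=
    gene_drugs.foldl
      (fun h gene_set => (PySem.Set.ofList gene_set).foldl (fun h g => h.insert g (h.getD g 0 + 1)) h)
      PySem.Dict.empty
  let occ : PySem.Dict String Int :=
    all_drugs.foldl (fun d x => d.insert x (d.getD x 0 + 1)) PySem.Dict.empty
  occ.items.foldl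
    (fun s p => if p.2 * hits.getD p.1 0 > s.2 then (p.1, p.2 * hits.getD p.1 0) else s)
    ("", -1)

-- ===== PRECONDITION & SPEC =====
def Spec_get_best_drug_and_remove_py (all_drugs : List String) (gene_drugs : List (List String)) (out : String × Int) : Prop := out = get_best_drug_and_remove_py_alt all_drugs gene_drugs
instance (all_drugs : List String) (gene_drugs : List (List String)) (out : String × Int) : Decidable (Spec_get_best_drug_and_remove_py all_drugs gene_drugs out) := by unfold Spec_get_best_drug_and_remove_py; infer_instance

-- ===== CLAIM (what is proved, stated in full; the proofs are below) =====
def Claim_equal_get_best_drug_and_remove_py : Prop := ∀ (all_drugs : List String) (gene_drugs : List (List String)), Dom_get_best_drug_and_remove_py all_drugs gene_drugs → Spec_get_best_drug_and_remove_py all_drugs gene_drugs (get_best_drug_and_remove_py all_drugs gene_drugs)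

-- ===== LEMMAS AND PROOFS =====

-- the score A accumulates per occurrence of a drug: how many gene sets contain it
def pvS (gene_drugs : List (List String)) (k : String) : Int :=
  (gene_drugs.countP (fun gs => gs.contains k) : Int)

theorem pv_set_add_mem (s : PySem.Set String) (x : String) (h : x ∈ s) :
    PySem.Set.add s x = s := by simp [PySem.Set.add, h]

theorem pv_set_update_const (l : List (List String)) (s : PySem.Set String) (x : String) (h : x ∈ s) :
    PySem.Set.update s (l.map (fun _ => x)) = s := by
  induction l generalizing s with
  | nil => rfl
  | cons g gs ih =>
    simp only [List.map_cons, PySem.Set.update, List.foldl_cons, pv_set_add_mem s x h]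
    exact ih s h

theorem pv_keys_insert (d : PySem.Dict String Int) (k : String) (v : Int) :
    (d.insert k v).keys = if d.contains k then d.keys else d.keys ++ [k] := by
  unfold PySem.Dict.insert
  split
  · simp only [PySem.Dict.keys, List.map_map]
    apply List.map_congr_left
    intro p _
    by_cases hb : (p.1 == k) = true
    · simp [Function.comp, (eq_of_beq hb).symm]
    · simp [Function.comp, hb]
  · simp [PySem.Dict.keys]

-- a dict with Nodup keys is its keys list paired with its lookups
theorem pv_items_eq_keys_map (d : PySem.Dict String Int) (h : d.keys.Nodup) :
    d.items = d.keys.map (fun k => (k, d.getD k 0)) := by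
  obtain ⟨items⟩ := d
  induction items with
  | nil => rfl
  | cons p rest ih =>
    simp only [PySem.Dict.keys, List.map_cons] at h ⊢
    obtain ⟨hp, hrest⟩ := List.nodup_cons.mp h
    have hd : (PySem.Dict.mk (p :: rest)).getD p.1 0 = p.2 := by
      simp [PySem.Dict.getD, PySem.Dict.get?]
    refine List.cons_eq_cons.mpr ⟨by rw [hd], ?_⟩
    have hrec := ih hrest
    simp only [PySem.Dict.keys] at hrec
    conv_lhs => rw [hrec]
    apply List.map_congr_left
    intro k hk
    have hne : (p.1 == k) = false := by
      simp only [List.mem_map] at hk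
      obtain ⟨q, hq, rfl⟩ := hk
      exact beq_eq_false_iff_ne.mpr (fun e => hp (e ▸ List.mem_map_of_mem hq))
    simp [PySem.Dict.getD, PySem.Dict.get?, hne]

-- constant-key modify iteration adds the length
theorem pv_iterate_getD (x k : String) (l : List (List String)) (d : PySem.Dict String Int) :
    (l.foldl (fun d _ => d.modify x 0 (· + 1)) d).getD k 0
      = d.getD k 0 + if k = x then (l.length : Int) else 0 := by
  induction l generalizing d with
  | nil => simp
  | cons g gs ih =>
    simp only [List.foldl_cons, ih, PySem.Dict.getD_modify, List.length_cons]
    by_cases hk : k = x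
    · simp [hk]; ring
    · simp [hk]

-- A's per-drug step: lookup effect
theorem pv_stepA_getD (gene_drugs : List (List String)) (d : PySem.Dict String Int) (x k : String) :
    ((gene_drugs.foldl (fun d gene_set => if gene_set.contains x then d.modify x 0 (· + 1) else d)
        (if d.contains x then d else d.insert x 0)).getD k 0)
      = d.getD k 0 + if k = x then pvS gene_drugs x else 0 := by
  rw [PySem.List.foldl_if_eq_foldl_filter (fun gs => gs.contains x)
      (fun d (_ : List String) => d.modify x 0 (· + 1)) gene_drugs
      (if d.contains x then d else d.insert x 0)]
  rw [pv_iterate_getD]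
  have hd' : (if d.contains x then d else d.insert x 0).getD k 0 = d.getD k 0 := by
    by_cases hc : d.contains x = true
    · simp [hc]
    · rw [if_neg hc]
      by_cases hk : k = x
      · subst hk
        rw [PySem.Dict.getD_insert_self]
        simp [PySem.Dict.getD, (PySem.Dict.get?_eq_none_iff_contains d k).mpr (by simpa using hc)]
      · exact PySem.Dict.getD_insert_of_ne d 0 0 hk
  rw [hd', pvS]
  congr 1
  by_cases hk : k = x <;> simp [hk, List.countP_eq_length_filter]

-- A's per-drug step: keys effect
theorem pv_stepA_keys (gene_drugs : List (List String)) (d : PySem.Dict String Int) (x : String) :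
    ((gene_drugs.foldl (fun d gene_set => if gene_set.contains x then d.modify x 0 (· + 1) else d)
        (if d.contains x then d else d.insert x 0)).keys)
      = PySem.Set.add d.keys x := by
  rw [PySem.List.foldl_if_eq_foldl_filter (fun gs => gs.contains x)
      (fun d (_ : List String) => d.modify x 0 (· + 1)) gene_drugs
      (if d.contains x then d else d.insert x 0)]
  have hmem : x ∈ (if d.contains x then d else d.insert x 0).keys := by
    by_cases hc : d.contains x = true
    · rw [if_pos hc]
      rw [PySem.Dict.contains_eq_decide_mem_keys] at hc
      exact of_decide_eq_true hc
    · rw [if_neg hc]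
      exact (PySem.Dict.mem_keys_insert d x x 0).mpr (Or.inl rfl)
  have hfold := PySem.Dict.keys_foldl_modify_key
      (gene_drugs.filter (fun gs => gs.contains x)) (fun (_ : List String) => x) (0 : Int)
      (fun _ _ => (· + 1)) (if d.contains x then d else d.insert x 0)
  rw [hfold, pv_set_update_const _ _ _ hmem]
  by_cases hc : d.contains x = true
  · rw [if_pos hc, pv_set_add_mem]
    rw [PySem.Dict.contains_eq_decide_mem_keys] at hc
    exact of_decide_eq_true hc
  · rw [if_neg hc, pv_keys_insert, if_neg hc]
    have hx : x ∉ d.keys := by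
      rw [PySem.Dict.contains_eq_decide_mem_keys] at hc
      simpa using hc
    simp [PySem.Set.add, hx]

theorem pv_A_getD (gene_drugs : List (List String)) (l : List String) (d : PySem.Dict String Int) (k : String) :
    ((l.foldl
        (fun d drug =>
          gene_drugs.foldl (fun d gene_set => if gene_set.contains drug then d.modify drug 0 (· + 1) else d)
            (if d.contains drug then d else d.insert drug 0))
        d).getD k 0)
      = d.getD k 0 + (l.count k : Int) * pvS gene_drugs k := by
  induction l generalizing d with
  | nil => simp
  | cons x xs ih =>
    simp only [List.foldl_cons, ih, pv_stepA_getD, List.count_cons]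
    by_cases hk : k = x
    · subst hk; simp; ring
    · have : (x == k) = false := beq_eq_false_iff_ne.mpr (fun e => hk e.symm)
      simp [hk, this]

theorem pv_A_keys (gene_drugs : List (List String)) (l : List String) (d : PySem.Dict String Int) :
    ((l.foldl
        (fun d drug =>
          gene_drugs.foldl (fun d gene_set => if gene_set.contains drug then d.modify drug 0 (· + 1) else d)
            (if d.contains drug then d else d.insert drug 0))
        d).keys)
      = PySem.Set.update d.keys l := by
  induction l generalizing d with
  | nil => rfl
  | cons x xs ih =>
    simp only [List.foldl_cons, ih, pv_stepA_keys, PySem.Set.update]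

-- B's hit counter computes pvS
theorem pv_hits_getD (l : List (List String)) (h : PySem.Dict String Int) (k : String) :
    ((l.foldl (fun h gene_set => (PySem.Set.ofList gene_set).foldl (fun h g => h.insert g (h.getD g 0 + 1)) h) h).getD k 0)
      = h.getD k 0 + pvS l k := by
  induction l generalizing h with
  | nil => simp [pvS]
  | cons g gs ih =>
    simp only [List.foldl_cons, ih, PySem.Dict.getD_foldl_insert_add_one]
    have hcnt : (List.count k (PySem.Set.ofList g) : Int) = if g.contains k then 1 else 0 := by
      by_cases hm : k ∈ g
      · rw [List.count_eq_one_of_mem (PySem.Set.nodup_ofList g) ((PySem.Set.mem_ofList g k).mpr hm)]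
        simp [hm]
      · rw [List.count_eq_zero_of_not_mem (fun hh => hm ((PySem.Set.mem_ofList g k).mp hh))]
        simp [hm]
    rw [hcnt]
    simp only [pvS, List.countP_cons]
    push_cast
    ring

-- ===== VERDICT (by name: the statement is the Claim_ definition above) =====
theorem get_best_drug_and_remove_py_spec : Claim_equal_get_best_drug_and_remove_py := by
  intro all_drugs gene_drugs _
  unfold Spec_get_best_drug_and_remove_py
  show get_best_drug_and_remove_py all_drugs gene_drugs = get_best_drug_and_remove_py_alt all_drugs gene_drugs
  simp only [get_best_drug_and_remove_py, get_best_drug_and_remove_py_alt]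
  -- name the two dicts
  set A : PySem.Dict String Int := all_drugs.foldl
      (fun d drug =>
        gene_drugs.foldl (fun d gene_set => if gene_set.contains drug then d.modify drug 0 (· + 1) else d)
          (if d.contains drug then d else d.insert drug 0))
      PySem.Dict.empty with hA
  set H : PySem.Dict String Int := gene_drugs.foldl
      (fun h gene_set => (PySem.Set.ofList gene_set).foldl (fun h g => h.insert g (h.getD g 0 + 1)) h)
      PySem.Dict.empty with hH
  have hkeys : A.keys = PySem.Set.ofList all_drugs := by
    rw [hA, pv_A_keys]
    simp [PySem.Dict.empty, PySem.Dict.keys, PySem.Set.update_nil_left]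
  have hAget : ∀ k, A.getD k 0 = (all_drugs.count k : Int) * pvS gene_drugs k := by
    intro k
    rw [hA, pv_A_getD]
    simp [PySem.Dict.empty, PySem.Dict.getD, PySem.Dict.get?]
  have hHget : ∀ k, H.getD k 0 = pvS gene_drugs k := by
    intro k
    rw [hH, pv_hits_getD]
    simp [PySem.Dict.empty, PySem.Dict.getD, PySem.Dict.get?]
  have hitems : A.items = (PySem.Set.ofList all_drugs).map
      (fun k => (k, (all_drugs.count k : Int) * pvS gene_drugs k)) := by
    rw [pv_items_eq_keys_map A (by rw [hkeys]; exact PySem.Set.nodup_ofList all_drugs), hkeys]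
    exact List.map_congr_left (fun k _ => by rw [hAget])
  rw [hitems, PySem.Dict.foldl_insert_getD_add_one_eq_counter, PySem.Dict.items_counter]
  rw [List.foldl_map, List.foldl_map]
  apply PySem.List.foldl_congr_mem
  intro s k _
  simp only [hHget, gt_iff_lt]
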